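-- pv_equiv track=rewrite | github.com/pypi-data/pypi-mirror-400 | packages/sofastats_lib/sofastats_lib-0.12.3-py3-none-any.whl/sofastats/output/stats/chi_square.py | get_x_axis_font_size
-- ===== SOURCE A (Python) =====
-- from collections.abc import Collection, Sequence
--
-- def get_x_axis_font_size(val_labels: Collection[str]) -> int:
--     max_len = max(len(x) for x in val_labels)
--     if max_len > 15:
--         font_size = 7
--     elif max_len > 10:
--         font_size = 9
--     elif max_len > 7:
--         font_size = 10
--     else:
--         font_size = 11
--     return font_size
-- ===== SOURCE B (Python) =====
-- def get_x_axis_font_size(val_labels):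
--     def size_for(n):
--         # branchless: non-increasing in n
--         return 11 - (n > 7) - (n > 10) - 2 * (n > 15)
--     return min(size_for(len(x)) for x in val_labels)
-- ===== Notes on version B (the rewrite author's own statement) =====
-- stated objective: alternative
-- what changed: Instead of taking the max length and feeding it through a threshold cascade, B maps every label directly to its own font size via a branchless arithmetic formula and returns the minimum of those sizes (valid because the size formula is non-increasing in length).
import Mathlib
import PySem

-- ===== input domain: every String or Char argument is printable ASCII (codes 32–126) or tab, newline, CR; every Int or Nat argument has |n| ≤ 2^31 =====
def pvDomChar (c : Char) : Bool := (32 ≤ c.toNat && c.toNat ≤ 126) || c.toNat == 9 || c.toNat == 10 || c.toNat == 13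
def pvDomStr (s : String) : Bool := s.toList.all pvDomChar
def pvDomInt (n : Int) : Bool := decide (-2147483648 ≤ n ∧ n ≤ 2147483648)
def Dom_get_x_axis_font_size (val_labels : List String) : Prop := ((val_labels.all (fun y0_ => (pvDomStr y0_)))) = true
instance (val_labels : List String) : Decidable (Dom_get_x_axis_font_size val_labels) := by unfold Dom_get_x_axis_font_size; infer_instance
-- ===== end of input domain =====

-- B maps each label to a font size via a branchless arithmetic formula and takes the min over labels, instead of A's max-length-then-cascade.


-- ===== PORT A =====
def get_x_axis_font_size (val_labels : List String) : Int :=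
  match PySem.List.max? (val_labels.map (fun x => PySem.Str.len x)) (fun y => y) with
  | none => 0  -- unreachable under Pre_ (Python max raises on empty)
  | some max_len =>
    if max_len > 15 then 7
    else if max_len > 10 then 9
    else if max_len > 7 then 10
    else 11

-- ===== PORT B =====
-- Python bool arithmetic: True/False count as 1/0
def pvSizeFor (n : Int) : Int :=
  11 - (if n > 7 then 1 else 0) - (if n > 10 then 1 else 0) - 2 * (if n > 15 then 1 else 0)

def get_x_axis_font_size_alt (val_labels : List String) : Int :=
  match PySem.List.min? (val_labels.map (fun x => pvSizeFor (PySem.Str.len x))) (fun y => y) with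
  | none => 0  -- unreachable under Pre_ (Python min raises on empty)
  | some m => m

-- ===== PRECONDITION & SPEC =====
-- Pre_ excludes only the empty list, on which Python's max()/min() raises ValueError.
def Pre_get_x_axis_font_size (val_labels : List String) : Prop := val_labels ≠ []
instance (val_labels : List String) : Decidable (Pre_get_x_axis_font_size val_labels) := by unfold Pre_get_x_axis_font_size; infer_instance
def pvWitness_get_x_axis_font_size : List String := ["abc"]

def Spec_get_x_axis_font_size (val_labels : List String) (out : Int) : Prop := out = get_x_axis_font_size_alt val_labels
instance (val_labels : List String) (out : Int) : Decidable (Spec_get_x_axis_font_size val_labels out) := by unfold Spec_get_x_axis_font_size; infer_instance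

-- ===== CLAIM =====
def Claim_equal_get_x_axis_font_size : Prop := ∀ (val_labels : List String), Dom_get_x_axis_font_size val_labels → Pre_get_x_axis_font_size val_labels → Spec_get_x_axis_font_size val_labels (get_x_axis_font_size val_labels)

-- ===== LEMMAS AND PROOFS =====
-- the cascade equals the branchless formula
theorem cascade_eq_sizeFor (m : Int) :
    (if m > 15 then (7:Int) else if m > 10 then 9 else if m > 7 then 10 else 11) = pvSizeFor m := by
  unfold pvSizeFor; split_ifs <;> omega

-- pvSizeFor is non-increasing, hence turns max into min
theorem sizeFor_max (a b : Int) : pvSizeFor (max a b) = min (pvSizeFor a) (pvSizeFor b) := by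
  unfold pvSizeFor
  rcases le_total a b with h | h <;> simp [max_eq_right, max_eq_left, h] <;> split_ifs <;> omega

theorem sizeFor_foldl (t : List Int) (a : Int) :
    pvSizeFor (t.foldl max a) = (t.map pvSizeFor).foldl min (pvSizeFor a) := by
  induction t generalizing a with
  | nil => rfl
  | cons h t ih => simp [List.foldl, ih, sizeFor_max]

-- ===== VERDICT =====
theorem get_x_axis_font_size_spec : Claim_equal_get_x_axis_font_size := by
  intro val_labels _ hpre
  unfold Spec_get_x_axis_font_size get_x_axis_font_size get_x_axis_font_size_alt
  cases val_labels with
  | nil => exact absurd rfl hpre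
  | cons l t =>
    simp only [List.map_cons, PySem.List.max?_id_cons, PySem.List.min?_id_cons]
    rw [cascade_eq_sizeFor, sizeFor_foldl]
    simp [List.map_map]
    rfl
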